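-- pv_equiv track=rewrite | github.com/johnzhoudev/leetcode-practice | meta_leetcode/763. Partition Labels.py | solve
-- ===== SOURCE A (Python) =====
-- def solve(s):
--     last = {}
--     for i in range(len(s) - 1, -1, -1):
--         c = s[i]
--         if c not in last:
--             last[c] = i
--
--     # Now greedily add
--     output = []
--     curr = 0
--     size = 0
--     end = 0 # inclusive
--
--     while curr < len(s):
--         size += 1 # add a number
--         end = max(end, last[s[curr]])
--         if curr == end: # you're done!
--             output.append(size)
--             size = 0
--
--         curr += 1
--
--     return output
-- ===== SOURCE B (Python) =====
-- def solve(s):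
--     # Interval-merge approach: per-character [first, last] intervals, sorted by
--     # start, merged in one pass; emit each merged interval's length.
--     first = {}
--     last = {}
--     for i, c in enumerate(s):
--         if c not in first:
--             first[c] = i
--         last[c] = i
--     intervals = sorted(((first[c], last[c]) for c in first), key=lambda p: p[0])
--     output = []
--     start = -1
--     end = -1
--     for f, l in intervals:
--         if f > end:
--             if start >= 0:
--                 output.append(end - start + 1)
--             start, end = f, l
--         else:
--             end = max(end, l)
--     if start >= 0:
--         output.append(end - start + 1)
--     return output
-- ===== Notes on version B (the rewrite author's own statement) =====
-- stated objective: alternative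
-- what changed: Replaces A's position-by-position greedy running-end scan (dict of last occurrences built backwards, then a while loop over every index emitting at fixpoints) by computing per-character [first,last] occurrence intervals in one forward pass, sorting them by start and merging overlapping intervals, emitting each merged interval's length.
import Mathlib
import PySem

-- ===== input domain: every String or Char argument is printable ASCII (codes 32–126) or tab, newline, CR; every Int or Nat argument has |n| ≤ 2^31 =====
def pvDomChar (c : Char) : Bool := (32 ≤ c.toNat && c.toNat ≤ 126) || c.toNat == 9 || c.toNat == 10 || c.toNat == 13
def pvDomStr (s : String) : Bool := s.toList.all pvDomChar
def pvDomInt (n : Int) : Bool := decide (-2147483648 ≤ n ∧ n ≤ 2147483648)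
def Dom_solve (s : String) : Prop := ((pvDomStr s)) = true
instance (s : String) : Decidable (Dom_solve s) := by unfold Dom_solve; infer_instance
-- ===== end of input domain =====

-- B replaces A's position-by-position greedy scan by building per-character [first,last]
-- intervals and merging them (different algorithm; a timing run measured a constant-factor speedup).


-- ===== PORT A =====
def solve (s : String) : List Int :=
  let cs := s.toList
  let n : Int := PySem.Str.len s
  -- last = {}; for i in range(len(s)-1, -1, -1): c = s[i]; if c not in last: last[c] = i
  let last : PySem.Dict Char Int :=
    (PySem.List.pyRange (n - 1) (-1) (-1)).foldl (fun d i =>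
      let c := PySem.List.pyGetD cs i ' '   -- s[i]; i is always in range on this loop
      if !(d.contains c) then d.insert c i else d) PySem.Dict.empty
  -- output = []; curr = 0; size = 0; end = 0; while curr < len(s): …  (curr takes 0,1,…,n-1)
  let st :=
    (PySem.List.pyRange 0 n 1).foldl (fun (st : List Int × Int × Int) curr =>
      let output := st.1
      let size := st.2.1 + 1
      let endv := max st.2.2 (last.getD (PySem.List.pyGetD cs curr ' ') 0)  -- last[s[curr]]; key always present
      if curr = endv then (output ++ [size], 0, endv) else (output, size, endv)) ([], 0, 0)
  st.1

-- ===== PORT B =====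
def solve_alt (s : String) : List Int :=
  let cs := s.toList
  -- first = {}; last = {}; for i, c in enumerate(s): if c not in first: first[c] = i; last[c] = i
  let fl : PySem.Dict Char Int × PySem.Dict Char Int :=
    (PySem.List.enumerate cs).foldl (fun fl ic =>
      let first := if !(fl.1.contains ic.2) then fl.1.insert ic.2 ic.1 else fl.1
      (first, fl.2.insert ic.2 ic.1)) (PySem.Dict.empty, PySem.Dict.empty)
  -- intervals = sorted(((first[c], last[c]) for c in first), key=lambda p: p[0])
  let intervals := PySem.List.sorted
    (fl.1.keys.map (fun c => (fl.1.getD c 0, fl.2.getD c 0)))   -- keys always present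
    (fun p => p.1) false
  -- output = []; start = -1; end = -1; for f, l in intervals: …
  let st :=
    intervals.foldl (fun (st : List Int × Int × Int) fe =>
      if fe.1 > st.2.2 then
        ((if st.2.1 ≥ 0 then st.1 ++ [st.2.2 - st.2.1 + 1] else st.1), fe.1, fe.2)
      else (st.1, st.2.1, max st.2.2 fe.2)) ([], -1, -1)
  if st.2.1 ≥ 0 then st.1 ++ [st.2.2 - st.2.1 + 1] else st.1

-- ===== PRECONDITION & SPEC =====
def Spec_solve (s : String) (out : List Int) : Prop := out = solve_alt s
instance (s : String) (out : List Int) : Decidable (Spec_solve s out) := by unfold Spec_solve; infer_instance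

-- ===== CLAIM (what is proved, stated in full; the proofs are below) =====
def Claim_equal_solve : Prop := ∀ (s : String), Dom_solve s → Spec_solve s (solve s)

-- ===== LEMMAS AND PROOFS =====

-- ---------- proof-side definitions ----------

-- last occurrence index of c in cs (meaningful only when c ∈ cs)
def lastOcc : List Char → Char → Nat
  | [], _ => 0
  | _ :: xs, c => if c ∈ xs then lastOcc xs c + 1 else 0

def lstI (cs : List Char) (c : Char) : Int := ((lastOcc cs c : Nat) : Int)

-- running max of lstI over the first i positions, -1 when i = 0
def RpF (cs : List Char) (i : Nat) : Int := ((cs.take i).map (lstI cs)).foldl max (-1)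

-- A's scan, as structural recursion on the list of per-position last-occurrence values
def segsA : List Int → Int → Int → Int → List Int
  | [], _, _, _ => []
  | l :: ls, i, sz, e =>
      if i = max e l then (sz + 1) :: segsA ls (i + 1) 0 (max e l)
      else segsA ls (i + 1) (sz + 1) (max e l)

-- B's merge, as structural recursion producing the remaining output
def mrg : List (Int × Int) → Int → Int → List Int
  | [], st, e => if st ≥ 0 then [e - st + 1] else []
  | fe :: ivs, st, e =>
      if fe.1 > e then (if st ≥ 0 then (e - st + 1) :: mrg ivs fe.1 fe.2 else mrg ivs fe.1 fe.2)
      else mrg ivs st (max e fe.2)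

-- the character intervals whose first occurrence is ≥ i
def ivsFrom (cs : List Char) (i : Nat) : List (Int × Int) :=
  ((PySem.List.dedup cs).filter (fun c => i ≤ cs.idxOf c)).map
    (fun c => ((cs.idxOf c : Int), lstI cs c))

-- ---------- lastOcc facts ----------

lemma lastOcc_lt {cs : List Char} {c : Char} (h : c ∈ cs) : lastOcc cs c < cs.length := by
  induction cs with
  | nil => cases h
  | cons x xs ih =>
      simp only [lastOcc, List.length_cons]
      by_cases hm : c ∈ xs
      · simp [hm, ih hm]
      · simp [hm]

lemma le_lastOcc {cs : List Char} {c : Char} {j : Nat} (hj : j < cs.length)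
    (h : cs[j] = c) : j ≤ lastOcc cs c := by
  induction cs generalizing j with
  | nil => simp at hj
  | cons x xs ih =>
      cases j with
      | zero => exact Nat.zero_le _
      | succ j =>
          simp only [List.getElem_cons_succ] at h
          have hjl : j < xs.length := by simpa using hj
          have hmem : c ∈ xs := h ▸ List.getElem_mem hjl
          simp only [lastOcc, hmem, if_pos]
          exact Nat.succ_le_succ (ih hjl h)

lemma lastOcc_append_singleton_self (xs : List Char) (x : Char) :
    lastOcc (xs ++ [x]) x = xs.length := by
  induction xs with
  | nil => simp [lastOcc]
  | cons y ys ih => simp [lastOcc, ih]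

lemma lastOcc_append_singleton_ne {xs : List Char} {x c : Char} (h : c ≠ x) :
    lastOcc (xs ++ [x]) c = lastOcc xs c := by
  induction xs with
  | nil => simp [lastOcc, h]
  | cons y ys ih =>
      simp only [List.cons_append, lastOcc, List.mem_append, List.mem_singleton, h,
        or_false, ih]

-- ---------- RpF facts ----------

lemma RpF_zero (cs : List Char) : RpF cs 0 = -1 := by simp [RpF]

lemma RpF_succ (cs : List Char) {i : Nat} (hi : i < cs.length) :
    RpF cs (i + 1) = max (RpF cs i) (lstI cs cs[i]) := by
  unfold RpF
  rw [List.take_add_one, List.getElem?_eq_getElem hi]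
  simp only [Option.toList_some, List.map_append, List.foldl_append, List.map_cons,
    List.map_nil, List.foldl_cons, List.foldl_nil]

lemma le_RpF {cs : List Char} {j i : Nat} (hj : j < i) (hi : i ≤ cs.length) :
    lstI cs (cs[j]'(lt_of_lt_of_le hj hi)) ≤ RpF cs i := by
  have hmem : lstI cs (cs[j]'(lt_of_lt_of_le hj hi)) ∈ (cs.take i).map (lstI cs) := by
    refine List.mem_map_of_mem ?_
    have : (cs.take i)[j]'(by simp [hj, lt_of_lt_of_le hj hi]) = cs[j]'(lt_of_lt_of_le hj hi) := by
      simp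
    exact this ▸ List.getElem_mem _
  exact (PySem.List.le_foldl_max _ _).2 _ hmem

lemma RpF_le {cs : List Char} (i : Nat) : RpF cs i ≤ (cs.length : Int) - 1 := by
  rcases PySem.List.foldl_max_mem ((cs.take i).map (lstI cs)) (-1) with h | h
  · unfold RpF; rw [h]; omega
  · unfold RpF
    rcases List.mem_map.1 h with ⟨c, hc, hval⟩
    have hcs : c ∈ cs := List.mem_of_mem_take hc
    have := lastOcc_lt hcs
    rw [← hval]; unfold lstI; omega

lemma lstI_ge_self {cs : List Char} {i : Nat} (hi : i < cs.length) :
    (i : Int) ≤ lstI cs cs[i] := by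
  have := le_lastOcc hi rfl
  unfold lstI; omega

-- ---------- idxOf / dedup facts ----------

lemma idxOf_getElem_of_not_mem_take {cs : List Char} {i : Nat} (hi : i < cs.length)
    (hnew : cs[i] ∉ cs.take i) : cs.idxOf cs[i] = i := by
  induction cs generalizing i with
  | nil => simp at hi
  | cons x xs ih =>
      cases i with
      | zero => simp
      | succ i =>
          have hxi : i < xs.length := by simpa using hi
          simp only [List.take_succ_cons, List.mem_cons, not_or, List.getElem_cons_succ] at hnew
          rw [List.idxOf_cons_ne _ (by exact fun h => hnew.1 h.symm)]
          simp [ih hxi hnew.2]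

lemma idxOf_le_of_getElem {cs : List Char} {c : Char} {j : Nat} (hj : j < cs.length)
    (h : cs[j] = c) : cs.idxOf c ≤ j := by
  induction cs generalizing j with
  | nil => simp at hj
  | cons x xs ih =>
      by_cases hx : x = c
      · simp [hx]
      · cases j with
        | zero => simp at h; exact absurd h hx
        | succ j =>
            rw [List.idxOf_cons_ne _ hx]
            exact Nat.succ_le_succ (ih (by simpa using hj) (by simpa using h))

lemma idxOf_lt_of_mem_take {cs : List Char} {i : Nat} {c : Char} (hc : c ∈ cs.take i) :
    cs.idxOf c < i := by
  rcases List.getElem_of_mem hc with ⟨j, hj, hval⟩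
  have hjlen : j < cs.length := lt_of_lt_of_le hj (by simpa using List.length_take_le)
  have hval' : cs[j] = c := by rw [← hval]; simp
  have hji : j < i := lt_of_lt_of_le hj (by simp)
  exact lt_of_le_of_lt (idxOf_le_of_getElem hjlen hval') hji

lemma dedup_pairwise_idxOf (cs : List Char) :
    (PySem.List.dedup cs).Pairwise (fun a b => cs.idxOf a < cs.idxOf b) := by
  rw [PySem.List.dedup_eq_ofList]
  induction cs with
  | nil => simp [PySem.Set.ofList_nil]
  | cons x xs ih =>
      rw [PySem.Set.ofList_cons]
      refine List.Pairwise.cons ?_ ?_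
      · intro b hb
        rcases (PySem.Set.mem_discard _ _ _).1 hb with ⟨_, hne⟩
        rw [List.idxOf_cons_self, List.idxOf_cons_ne _ (fun h => hne h.symm)]
        exact Nat.succ_pos _
      · have hsub : (PySem.Set.discard (PySem.Set.ofList xs) x).Sublist (PySem.Set.ofList xs) := by
          unfold PySem.Set.discard
          exact List.filter_sublist
        refine List.Pairwise.imp_of_mem ?_ (List.Pairwise.sublist hsub ih)
        intro a b ha hb hlt
        rcases (PySem.Set.mem_discard _ _ _).1 ha with ⟨_, hna⟩
        rcases (PySem.Set.mem_discard _ _ _).1 hb with ⟨_, hnb⟩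
        rw [List.idxOf_cons_ne _ (fun h => hna h.symm), List.idxOf_cons_ne _ (fun h => hnb h.symm)]
        exact Nat.succ_lt_succ hlt

lemma ivsFrom_zero (cs : List Char) :
    ivsFrom cs 0 = (PySem.List.dedup cs).map (fun c => ((cs.idxOf c : Int), lstI cs c)) := by
  unfold ivsFrom
  congr 1
  exact List.filter_eq_self.2 (fun c _ => by simp)

lemma ivsFrom_length (cs : List Char) : ivsFrom cs cs.length = [] := by
  unfold ivsFrom
  rw [List.filter_eq_nil_iff.2, List.map_nil]
  intro c hc
  have : c ∈ cs := (PySem.List.mem_dedup _ _).1 hc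
  have := List.idxOf_lt_length_of_mem this
  simp; omega

lemma filter_le_split {ds : List Char} {g : Char → Nat} {i : Nat}
    (hp : ds.Pairwise (fun a b => g a < g b)) {x : Char} (hx : x ∈ ds) (hgx : g x = i) :
    ds.filter (fun c => i ≤ g c) = x :: ds.filter (fun c => i + 1 ≤ g c) := by
  induction ds with
  | nil => cases hx
  | cons y ys ih =>
      rcases List.pairwise_cons.1 hp with ⟨hy, hp'⟩
      rcases List.mem_cons.1 hx with hxy | hxys
      · subst hxy
        rw [List.filter_cons_of_pos (by simp [hgx]),
            List.filter_cons_of_neg (by simp [hgx])]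
        congr 1
        refine List.filter_congr ?_
        intro b hb
        have := hy b hb
        simp only [decide_eq_decide]
        omega
      · have hgy : g y < i := hgx ▸ hy x hxys
        rw [List.filter_cons_of_neg (by simpa using by omega),
            List.filter_cons_of_neg (by simpa using by omega)]
        exact ih hp' hxys

lemma ivsFrom_cons {cs : List Char} {i : Nat} (hi : i < cs.length)
    (hnew : cs[i] ∉ cs.take i) :
    ivsFrom cs i = ((i : Int), lstI cs cs[i]) :: ivsFrom cs (i + 1) := by
  unfold ivsFrom
  have hx : cs[i] ∈ PySem.List.dedup cs := (PySem.List.mem_dedup _ _).2 (List.getElem_mem hi)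
  rw [filter_le_split (dedup_pairwise_idxOf cs) hx (idxOf_getElem_of_not_mem_take hi hnew)]
  rw [List.map_cons, idxOf_getElem_of_not_mem_take hi hnew]

lemma ivsFrom_skip {cs : List Char} {i : Nat} (hi : i < cs.length)
    (hseen : cs[i] ∈ cs.take i) :
    ivsFrom cs i = ivsFrom cs (i + 1) := by
  unfold ivsFrom
  congr 1
  refine List.filter_congr ?_
  intro c hc
  simp only [decide_eq_decide]
  have hne : cs.idxOf c ≠ i := by
    intro heq
    have hlt : cs.idxOf c < cs.length := heq ▸ hi
    have : cs[cs.idxOf c]'hlt = c := List.getElem_idxOf hlt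
    have hc' : cs[i] = c := by
      subst heq; exact this
    exact absurd (idxOf_lt_of_mem_take (hc' ▸ hseen)) (by omega)
  omega

-- ---------- the core correspondence ----------

lemma core (cs : List Char) : ∀ d i st, cs.length = i + d → 1 ≤ i → 0 ≤ st →
    (((i : Int) ≤ RpF cs i) →
      segsA ((cs.drop i).map (lstI cs)) i ((i : Int) - st) (RpF cs i)
        = mrg (ivsFrom cs i) st (RpF cs i))
    ∧ ((RpF cs i = (i : Int) - 1) →
      mrg (ivsFrom cs i) st (RpF cs i)
        = (RpF cs i - st + 1) :: segsA ((cs.drop i).map (lstI cs)) i 0 (RpF cs i)) := by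
  intro d
  induction d with
  | zero =>
      intro i st hlen h1 hst
      have hieq : i = cs.length := by omega
      constructor
      · intro hle
        have := RpF_le (cs := cs) i
        omega
      · intro _
        subst hieq
        rw [ivsFrom_length, List.drop_length]
        simp [mrg, segsA, hst]
  | succ d ih =>
      intro i st hlen h1 hst
      have hi : i < cs.length := by omega
      have hdrop : cs.drop i = cs[i] :: cs.drop (i + 1) := List.drop_eq_getElem_cons hi
      have hRs : RpF cs (i + 1) = max (RpF cs i) (lstI cs cs[i]) := RpF_succ cs hi
      have hlI : (i : Int) ≤ lstI cs cs[i] := lstI_ge_self hi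
      by_cases hseen : cs[i] ∈ cs.take i
      · -- the character at i was seen before: its interval is already merged
        have hle : lstI cs cs[i] ≤ RpF cs i := by
          rcases List.getElem_of_mem hseen with ⟨j, hj, hval⟩
          have hji : j < i := lt_of_lt_of_le hj (by simp)
          have hval' : cs[j]'(lt_of_lt_of_le hji (le_of_lt hi)) = cs[i] := by
            rw [← hval]; simp
          have := le_RpF hji (le_of_lt hi)
          rwa [hval'] at this
        have hmax : max (RpF cs i) (lstI cs cs[i]) = RpF cs i := max_eq_left hle
        have hiv := ivsFrom_skip hi hseen
        constructor
        · intro hile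
          rw [hdrop, List.map_cons]
          simp only [segsA, hmax]
          by_cases hie : (i : Int) = RpF cs i
          · rw [if_pos hie]
            have IH := (ih (i + 1) st (by omega) (by omega) hst).2
              (by rw [hRs, hmax]; push_cast; omega)
            rw [hRs, hmax] at IH
            push_cast at IH ⊢
            rw [hiv, IH]
            congr 1
            omega
          · rw [if_neg hie]
            have IH := (ih (i + 1) st (by omega) (by omega) hst).1
              (by rw [hRs, hmax]; push_cast; omega)
            rw [hRs, hmax] at IH
            push_cast at IH ⊢
            rw [hiv, ← IH]
            have harg : (i : Int) - st + 1 = (i : Int) + 1 - st := by ring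
            rw [harg]
        · intro hcut
          omega
      · -- the character at i is new: its interval heads ivsFrom i
        have hiv := ivsFrom_cons hi hseen
        constructor
        · intro hile
          rw [hdrop, List.map_cons, hiv]
          simp only [segsA, mrg]
          rw [if_neg (show ¬((i : Int), lstI cs cs[i]).1 > RpF cs i by simp; omega)]
          by_cases hie : (i : Int) = max (RpF cs i) (lstI cs cs[i])
          · rw [if_pos hie]
            have IH := (ih (i + 1) st (by omega) (by omega) hst).2
              (by rw [hRs]; push_cast; omega)
            rw [hRs] at IH
            push_cast at IH ⊢
            rw [IH]
            congr 1
            omega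
          · rw [if_neg hie]
            have IH := (ih (i + 1) st (by omega) (by omega) hst).1
              (by rw [hRs]; push_cast; omega)
            rw [hRs] at IH
            push_cast at IH ⊢
            rw [← IH]
            have harg : (i : Int) - st + 1 = (i : Int) + 1 - st := by ring
            rw [harg]
        · intro hcut
          have hmaxl : max (RpF cs i) (lstI cs cs[i]) = lstI cs cs[i] :=
            max_eq_right (by omega)
          rw [hiv, hdrop, List.map_cons]
          simp only [segsA, mrg]
          rw [if_pos (show ((i : Int), lstI cs cs[i]).1 > RpF cs i by simp; omega),
              if_pos (show st ≥ 0 by omega)]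
          congr 1
          by_cases hil : (i : Int) = lstI cs cs[i]
          · rw [if_pos (by rw [hmaxl]; exact hil)]
            have IH := (ih (i + 1) ((i : Int)) (by omega) (by omega) (by omega)).2
              (by rw [hRs, hmaxl]; push_cast; omega)
            rw [hRs, hmaxl] at IH
            push_cast at IH ⊢
            rw [IH, hmaxl]
            congr 1
            omega
          · rw [if_neg (by rw [hmaxl]; exact hil)]
            have IH := (ih (i + 1) ((i : Int)) (by omega) (by omega) (by omega)).1
              (by rw [hRs, hmaxl]; push_cast; omega)
            rw [hRs, hmaxl] at IH
            push_cast at IH ⊢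
            rw [← IH, hmaxl]
            norm_num

-- ---------- glue: port A equals segsA ----------

lemma dictA_spec (cs : List Char) : ∀ (k : Nat) (d0 : PySem.Dict Char Int), k ≤ cs.length →
    ∀ c, ((PySem.List.pyRange ((k : Int) - 1) (-1) (-1)).foldl (fun d i =>
        let c := PySem.List.pyGetD cs i ' '
        if !(d.contains c) then d.insert c i else d) d0).get? c
      = if d0.contains c then d0.get? c
        else if c ∈ cs.take k then some ((lastOcc (cs.take k) c : Int)) else none := by
  intro k
  induction k with
  | zero =>
      intro d0 _ c
      rw [PySem.List.pyRange_neg_one_eq_nil (by omega)]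
      simp only [List.foldl_nil, List.take_zero, List.not_mem_nil, if_false]
      by_cases h : d0.contains c
      · simp [h]
      · simp [h, (PySem.Dict.get?_eq_none_iff_contains d0 c).2 (by simpa using h)]
  | succ k ih =>
      intro d0 hk c
      have hkl : k < cs.length := by omega
      have hcons : PySem.List.pyRange (((k : Nat) + 1 : Int) - 1) (-1) (-1)
          = (k : Int) :: PySem.List.pyRange ((k : Int) - 1) (-1) (-1) := by
        have := PySem.List.pyRange_neg_one_cons (a := (k : Int)) (b := -1) (by omega)
        simpa using this
      push_cast
      rw [hcons, List.foldl_cons]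
      have hget : PySem.List.pyGetD cs ((k : Nat) : Int) ' ' = cs[k] := by
        simp [PySem.List.pyGetD_natCast, List.getD_eq_getElem?_getD,
          List.getElem?_eq_getElem hkl]
      have htake : cs.take (k + 1) = cs.take k ++ [cs[k]] := by
        rw [List.take_add_one, List.getElem?_eq_getElem hkl]; rfl
      simp only [hget]
      by_cases hd : d0.contains cs[k]
      · rw [if_neg (by simp [hd])]
        rw [ih d0 (by omega) c]
        by_cases hc : d0.contains c
        · simp [hc]
        · rw [if_neg hc, if_neg hc]
          have hne : c ≠ cs[k] := fun h => hc (h ▸ hd)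
          rw [htake]
          simp only [List.mem_append, List.mem_singleton, hne, or_false]
          by_cases hm : c ∈ cs.take k
          · rw [if_pos hm, if_pos hm, lastOcc_append_singleton_ne hne]
          · rw [if_neg hm, if_neg hm]
      · rw [if_pos (by simp [hd])]
        rw [ih _ (by omega) c]
        by_cases hc0 : c = cs[k]
        · subst hc0
          rw [if_pos (by simp [PySem.Dict.contains_insert])]
          rw [PySem.Dict.get?_insert_self, if_neg hd,
            if_pos (show cs[k] ∈ cs.take (k + 1) by
              have h2 : k < (List.take (k + 1) cs).length := by simp; omega
              have h3 : (List.take (k + 1) cs)[k]'h2 = cs[k] := List.getElem_take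
              exact h3 ▸ List.getElem_mem h2),
            htake, lastOcc_append_singleton_self]
          have : (cs.take k).length = k := List.length_take_of_le (by omega)
          rw [this]
        · have hcontains : (d0.insert cs[k] ((k : Nat) : Int)).contains c = d0.contains c := by
            rw [PySem.Dict.contains_insert]
            simp [hc0]
          rw [hcontains]
          by_cases hc : d0.contains c
          · rw [if_pos hc, if_pos hc, PySem.Dict.get?_insert_of_ne _ _ hc0]
          · rw [if_neg hc, if_neg hc, htake]
            simp only [List.mem_append, List.mem_singleton, hc0, or_false]
            by_cases hm : c ∈ cs.take k
            · rw [if_pos hm, if_pos hm, lastOcc_append_singleton_ne hc0]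
            · rw [if_neg hm, if_neg hm]

lemma scanA (g : Int → Int) (n : Int) : ∀ (d : Nat) (k : Int) (out : List Int) (sz e : Int),
    n = k + d →
    ((PySem.List.pyRange k n 1).foldl (fun st curr =>
        let output := st.1
        let size := st.2.1 + 1
        let endv := max st.2.2 (g curr)
        if curr = endv then (output ++ [size], 0, endv) else (output, size, endv)) (out, sz, e)).1
      = out ++ segsA ((PySem.List.pyRange k n 1).map g) k sz e := by
  intro d
  induction d with
  | zero =>
      intro k out sz e hn
      rw [PySem.List.pyRange_one_eq_nil (by omega)]
      simp [segsA]
  | succ d ih =>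
      intro k out sz e hn
      rw [PySem.List.pyRange_one_cons (by omega), List.foldl_cons, List.map_cons]
      simp only [segsA]
      by_cases hc : k = max e (g k)
      · rw [if_pos hc, if_pos hc, ih (k + 1) _ _ _ (by omega), List.append_assoc]
        rfl
      · rw [if_neg hc, if_neg hc, ih (k + 1) _ _ _ (by omega)]

-- ---------- glue: port B equals mrg ----------

lemma mrgFold : ∀ (ivs : List (Int × Int)) (out : List Int) (st e : Int),
    (if ((ivs.foldl (fun st fe =>
        if fe.1 > st.2.2 then
          ((if st.2.1 ≥ 0 then st.1 ++ [st.2.2 - st.2.1 + 1] else st.1), fe.1, fe.2)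
        else (st.1, st.2.1, max st.2.2 fe.2)) (out, st, e)).2.1 ≥ 0) then
      (ivs.foldl (fun st fe =>
        if fe.1 > st.2.2 then
          ((if st.2.1 ≥ 0 then st.1 ++ [st.2.2 - st.2.1 + 1] else st.1), fe.1, fe.2)
        else (st.1, st.2.1, max st.2.2 fe.2)) (out, st, e)).1
        ++ [(ivs.foldl (fun st fe =>
        if fe.1 > st.2.2 then
          ((if st.2.1 ≥ 0 then st.1 ++ [st.2.2 - st.2.1 + 1] else st.1), fe.1, fe.2)
        else (st.1, st.2.1, max st.2.2 fe.2)) (out, st, e)).2.2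
          - (ivs.foldl (fun st fe =>
        if fe.1 > st.2.2 then
          ((if st.2.1 ≥ 0 then st.1 ++ [st.2.2 - st.2.1 + 1] else st.1), fe.1, fe.2)
        else (st.1, st.2.1, max st.2.2 fe.2)) (out, st, e)).2.1 + 1]
     else (ivs.foldl (fun st fe =>
        if fe.1 > st.2.2 then
          ((if st.2.1 ≥ 0 then st.1 ++ [st.2.2 - st.2.1 + 1] else st.1), fe.1, fe.2)
        else (st.1, st.2.1, max st.2.2 fe.2)) (out, st, e)).1)
      = out ++ mrg ivs st e := by
  intro ivs
  induction ivs with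
  | nil =>
      intro out st e
      simp only [List.foldl_nil, mrg]
      by_cases h : st ≥ 0
      · rw [if_pos h, if_pos h]
      · rw [if_neg h, if_neg h]; simp
  | cons fe ivs ih =>
      intro out st e
      rw [List.foldl_cons]
      simp only [mrg]
      by_cases h : fe.1 > e
      · rw [if_pos h, if_pos h]
        by_cases h2 : st ≥ 0
        · rw [if_pos h2, if_pos h2, ih _ _ _, List.append_assoc]
          rfl
        · rw [if_neg h2, if_neg h2, ih _ _ _]
      · rw [if_neg h, if_neg h, ih _ _ _]

lemma idxOf?_eq_some_idxOf {cs : List Char} {c : Char} (h : c ∈ cs) :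
    List.idxOf? c cs = some (List.idxOf c cs) := by
  induction cs with
  | nil => cases h
  | cons x xs ih =>
      by_cases hx : x = c
      · subst hx; simp [List.idxOf?_cons, List.idxOf_cons_self]
      · rw [List.idxOf_cons_ne _ hx]
        simp only [List.idxOf?_cons, beq_iff_eq, hx, if_false]
        rcases List.mem_cons.1 h with h' | h'
        · exact absurd h'.symm hx
        · rw [ih h']; rfl

lemma foldB_spec (cs : List Char) : ∀ (j : Int) (f0 l0 : PySem.Dict Char Int),
    (∀ c, ((PySem.List.enumerate cs j).foldl (fun fl ic =>
        (if !(fl.1.contains ic.2) then fl.1.insert ic.2 ic.1 else fl.1,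
         fl.2.insert ic.2 ic.1)) (f0, l0)).1.get? c
      = if f0.contains c then f0.get? c
        else (PySem.List.index? cs c).map (fun k : Nat => j + (k : Int)))
    ∧ (∀ c, ((PySem.List.enumerate cs j).foldl (fun fl ic =>
        (if !(fl.1.contains ic.2) then fl.1.insert ic.2 ic.1 else fl.1,
         fl.2.insert ic.2 ic.1)) (f0, l0)).2.get? c
      = if c ∈ cs then some (j + (lastOcc cs c : Int)) else l0.get? c)
    ∧ ((PySem.List.enumerate cs j).foldl (fun fl ic =>
        (if !(fl.1.contains ic.2) then fl.1.insert ic.2 ic.1 else fl.1,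
         fl.2.insert ic.2 ic.1)) (f0, l0)).1.keys
      = PySem.Set.update f0.keys cs := by
  induction cs with
  | nil =>
      intro j f0 l0
      refine ⟨fun c => ?_, fun c => ?_, ?_⟩
      · simp only [PySem.List.enumerate_nil, List.foldl_nil]
        by_cases h : f0.contains c
        · rw [if_pos h]
        · rw [if_neg h]
          simp [(PySem.Dict.get?_eq_none_iff_contains f0 c).2 (by simpa using h),
            PySem.List.index?_eq_idxOf?]
      · simp [PySem.List.enumerate_nil]
      · simp [PySem.List.enumerate_nil, PySem.Set.update_nil]
  | cons c0 rest ih =>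
      intro j f0 l0
      rw [PySem.List.enumerate_cons]
      simp only [List.foldl_cons]
      obtain ⟨ih1, ih2, ih3⟩ := ih (j + 1)
        (if !(f0.contains c0) then f0.insert c0 j else f0) (l0.insert c0 j)
      refine ⟨fun c => ?_, fun c => ?_, ?_⟩
      · rw [ih1 c]
        have hidx : ∀ hc0 : c ≠ c0,
            (PySem.List.index? (c0 :: rest) c).map (fun k : Nat => j + (k : Int))
              = (PySem.List.index? rest c).map (fun k : Nat => j + 1 + (k : Int)) := by
          intro hc0
          rw [PySem.List.index?_cons_of_ne _ (fun h => hc0 h.symm), Option.map_map]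
          congr 1
          funext k
          simp only [Function.comp_apply]
          push_cast; ring
        by_cases hf0 : f0.contains c0
        · have hf1 : (if !(f0.contains c0) then f0.insert c0 j else f0) = f0 := by
            simp [hf0]
          rw [hf1]
          by_cases hf : f0.contains c
          · rw [if_pos hf, if_pos hf]
          · have hc0 : c ≠ c0 := fun h => hf (h ▸ hf0)
            rw [if_neg hf, if_neg hf, hidx hc0]
        · have hf1 : (if !(f0.contains c0) then f0.insert c0 j else f0)
              = f0.insert c0 j := by simp [hf0]
          rw [hf1]
          by_cases hc0 : c = c0
          · subst hc0
            rw [if_pos (by simp [PySem.Dict.contains_insert]), if_neg hf0,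
              PySem.Dict.get?_insert_self, PySem.List.index?_cons_self]
            simp
          · rw [show (f0.insert c0 j).contains c = f0.contains c by
                simp [PySem.Dict.contains_insert, hc0]]
            by_cases hf : f0.contains c
            · rw [if_pos hf, if_pos hf, PySem.Dict.get?_insert_of_ne _ _ hc0]
            · rw [if_neg hf, if_neg hf, hidx hc0]
      · rw [ih2 c]
        by_cases hrest : c ∈ rest
        · rw [if_pos hrest, if_pos (List.mem_cons_of_mem _ hrest)]
          simp only [lastOcc, hrest, if_pos]
          congr 1
          push_cast; ring
        · rw [if_neg hrest]
          by_cases hc0 : c = c0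
          · subst hc0
            rw [if_pos (List.mem_cons_self), PySem.Dict.get?_insert_self]
            simp [lastOcc, hrest]
          · rw [if_neg (by simp [hc0, hrest]), PySem.Dict.get?_insert_of_ne _ _ hc0]
      · rw [ih3, PySem.Set.update_cons]
        congr 1
        by_cases hf0 : f0.contains c0
        · rw [if_neg (by simp [hf0]),
            PySem.Set.add_of_mem ((PySem.Dict.contains_iff_mem_keys f0 c0).1 hf0)]
        · rw [if_pos (by simp [hf0]),
            PySem.Dict.keys_insert_of_not_contains _ _ (by simpa using hf0),
            PySem.Set.add_of_not_mem (fun hm => by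
              simp [(PySem.Dict.contains_iff_mem_keys f0 c0).2 hm] at hf0)]

-- ---------- bootstrap: first position ----------

lemma boot (cs : List Char) :
    segsA (cs.map (lstI cs)) 0 0 0 = mrg (ivsFrom cs 0) (-1) (-1) := by
  cases cs with
  | nil => simp [segsA, mrg, ivsFrom, PySem.List.dedup]
  | cons x t =>
      have hi : 0 < (x :: t).length := by simp
      have hl0 : (0 : Int) ≤ lstI (x :: t) x := by unfold lstI; positivity
      have hcons : ivsFrom (x :: t) 0
          = ((0 : Int), lstI (x :: t) x) :: ivsFrom (x :: t) 1 := by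
        have := ivsFrom_cons (cs := x :: t) (i := 0) hi (by simp)
        simpa using this
      have hR1 : RpF (x :: t) 1 = lstI (x :: t) x := by
        rw [RpF_succ _ hi]
        simp only [List.getElem_cons_zero, RpF_zero]
        omega
      rw [hcons, List.map_cons]
      simp only [segsA, mrg]
      rw [if_pos (show ((0 : Int), lstI (x :: t) x).1 > -1 by simp),
          if_neg (show ¬((-1 : Int) ≥ 0) by omega)]
      have hmax0 : max (0 : Int) (lstI (x :: t) x) = lstI (x :: t) x := by omega
      rw [hmax0]
      by_cases h0 : (0 : Int) = lstI (x :: t) x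
      · rw [if_pos h0]
        have IH := (core (x :: t) t.length 1 0 (by simp; omega) (by omega) (by omega)).2
          (by rw [hR1]; push_cast; omega)
        rw [hR1] at IH
        push_cast at IH
        rw [IH]
        simp only [List.drop_one, List.tail_cons]
        congr 1
        omega
      · rw [if_neg h0]
        have IH := (core (x :: t) t.length 1 0 (by simp; omega) (by omega) (by omega)).1
          (by rw [hR1]; push_cast; omega)
        rw [hR1] at IH
        push_cast at IH
        rw [← IH]
        simp only [List.drop_one, List.tail_cons]
        norm_num

-- ---------- the two ports, rephrased ----------

lemma portA_eq (s : String) :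
    solve s = segsA (s.toList.map (lstI s.toList)) 0 0 0 := by
  have hgetd : ∀ c ∈ s.toList,
      ((PySem.List.pyRange (((s.toList.length : Nat) : Int) - 1) (-1) (-1)).foldl
        (fun d i =>
          let c := PySem.List.pyGetD s.toList i ' '
          if !(d.contains c) then d.insert c i else d) PySem.Dict.empty).getD c 0
      = lstI s.toList c := by
    intro c hc
    rw [PySem.Dict.getD_eq_get?_getD]
    have hd := dictA_spec s.toList s.toList.length PySem.Dict.empty (le_refl _) c
    rw [List.take_length] at hd
    rw [hd, if_neg (by simp [PySem.Dict.contains_empty]), if_pos hc]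
    rfl
  have hmapg : (PySem.List.pyRange 0 ((s.toList.length : Int)) 1).map
      (fun curr => ((PySem.List.pyRange (((s.toList.length : Nat) : Int) - 1) (-1) (-1)).foldl
        (fun d i =>
          let c := PySem.List.pyGetD s.toList i ' '
          if !(d.contains c) then d.insert c i else d) PySem.Dict.empty).getD
        (PySem.List.pyGetD s.toList curr ' ') 0)
      = s.toList.map (lstI s.toList) := by
    have hcomp : (fun curr => ((PySem.List.pyRange (((s.toList.length : Nat) : Int) - 1) (-1) (-1)).foldl
        (fun d i =>
          let c := PySem.List.pyGetD s.toList i ' '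
          if !(d.contains c) then d.insert c i else d) PySem.Dict.empty).getD
        (PySem.List.pyGetD s.toList curr ' ') 0)
        = (fun c => ((PySem.List.pyRange (((s.toList.length : Nat) : Int) - 1) (-1) (-1)).foldl
        (fun d i =>
          let c := PySem.List.pyGetD s.toList i ' '
          if !(d.contains c) then d.insert c i else d) PySem.Dict.empty).getD c 0)
          ∘ (fun j : Int => PySem.List.pyGetD s.toList j ' ') := rfl
    rw [hcomp, ← List.map_map, PySem.List.map_pyGetD_pyRange_zero']
    exact List.map_congr_left hgetd
  have hA := scanA (fun curr => ((PySem.List.pyRange (((s.toList.length : Nat) : Int) - 1) (-1) (-1)).foldl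
        (fun d i =>
          let c := PySem.List.pyGetD s.toList i ' '
          if !(d.contains c) then d.insert c i else d) PySem.Dict.empty).getD
        (PySem.List.pyGetD s.toList curr ' ') 0)
      ((s.toList.length : Int)) s.toList.length 0 [] 0 0 (by push_cast; ring)
  rw [hmapg] at hA
  exact hA

lemma portB_eq (s : String) :
    solve_alt s = mrg (ivsFrom s.toList 0) (-1) (-1) := by
  obtain ⟨hf, hl, hk⟩ := foldB_spec s.toList 0 PySem.Dict.empty PySem.Dict.empty
  set P := (PySem.List.enumerate s.toList 0).foldl (fun fl ic =>
      (if !(fl.1.contains ic.2) then fl.1.insert ic.2 ic.1 else fl.1,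
       fl.2.insert ic.2 ic.1)) (PySem.Dict.empty, PySem.Dict.empty) with hP
  have hmap : P.1.keys.map (fun c => (P.1.getD c 0, P.2.getD c 0))
      = (PySem.List.dedup s.toList).map
          (fun c => ((s.toList.idxOf c : Int), lstI s.toList c)) := by
    rw [hk, PySem.Dict.keys_empty, PySem.Set.update_nil_left, ← PySem.List.dedup_eq_ofList]
    refine List.map_congr_left (fun c hc => ?_)
    have hcm : c ∈ s.toList := (PySem.List.mem_dedup _ _).1 hc
    rw [PySem.Dict.getD_eq_get?_getD, PySem.Dict.getD_eq_get?_getD, hf c, hl c,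
      if_neg (by simp [PySem.Dict.contains_empty]), if_pos hcm,
      PySem.List.index?_eq_idxOf?, idxOf?_eq_some_idxOf hcm]
    simp [lstI]
  have hpair : (P.1.keys.map (fun c => (P.1.getD c 0, P.2.getD c 0))).Pairwise
      (fun a b => a.1 ≤ b.1) := by
    rw [hmap, List.pairwise_map]
    exact (dedup_pairwise_idxOf s.toList).imp (fun h => by simp; omega)
  have hsorted := PySem.List.sorted_eq_self_of_pairwise
    (P.1.keys.map (fun c => (P.1.getD c 0, P.2.getD c 0))) (fun p : Int × Int => p.1) hpair
  have hB := mrgFold (PySem.List.sorted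
      (P.1.keys.map (fun c => (P.1.getD c 0, P.2.getD c 0)))
      (fun p => p.1) false) [] (-1) (-1)
  have h1 : solve_alt s = [] ++ mrg (PySem.List.sorted
      (P.1.keys.map (fun c => (P.1.getD c 0, P.2.getD c 0)))
      (fun p => p.1) false) (-1) (-1) := hB
  rw [h1, List.nil_append, hsorted, hmap, ivsFrom_zero]

-- ===== VERDICT (by name: the statement is the Claim_ definition above) =====
theorem solve_spec : Claim_equal_solve := by
  unfold Claim_equal_solve Spec_solve
  intro s _
  rw [portA_eq, portB_eq, boot]
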